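-- pv_equiv track=rewrite | github.com/pypi-data/pypi-mirror-67 | packages/estring/estring-1.7.tar.gz/estring-1.7/ASSETOOL/prehandle.py | emoji_sequence_line2rvl
-- ===== SOURCE A (Python) =====
-- def emoji_sequence_line2rvl(line):
--     rvl = []
--     cache = ""
--     first_pound = True
--     for i in range(len(line)):
--         ch = line[i]
--         if(ch==';'):
--             cache = cache.strip()
--             rvl.append(cache)
--             cache = ''
--         elif(ch=="#" and first_pound):
--             cache = cache.strip()
--             rvl.append(cache)
--             cache = ''
--             first_pound = False
--         else:
--             cache = cache+ch
--     cache = cache.strip()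
--     rvl.append(cache)
--     return(rvl)
-- ===== SOURCE B (Python) =====
-- def emoji_sequence_line2rvl(line):
--     return [seg.strip() for seg in line.replace('#', ';', 1).split(';')]
-- ===== Notes on version B (the rewrite author's own statement) =====
-- stated objective: simpler
-- what changed: Replaces A's per-character scan with accumulator and first-pound flag by a two-step transform: turn the first hash into a semicolon (replace with count 1), split on semicolons, and strip each segment; the library split/strip also make it measurably faster by a constant factor.
import Mathlib
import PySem

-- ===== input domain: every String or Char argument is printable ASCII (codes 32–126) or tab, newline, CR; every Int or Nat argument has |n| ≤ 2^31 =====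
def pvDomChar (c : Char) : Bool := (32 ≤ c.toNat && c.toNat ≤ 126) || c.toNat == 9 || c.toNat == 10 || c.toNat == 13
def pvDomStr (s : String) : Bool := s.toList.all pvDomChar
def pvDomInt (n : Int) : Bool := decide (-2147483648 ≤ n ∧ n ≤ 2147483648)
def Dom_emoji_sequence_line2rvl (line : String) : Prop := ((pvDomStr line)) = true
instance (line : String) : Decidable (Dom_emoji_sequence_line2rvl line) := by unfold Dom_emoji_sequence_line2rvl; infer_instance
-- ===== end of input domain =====

-- B replaces A's per-character scan (accumulator + first-pound flag) by a transform-then-split: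
-- turn the first '#' into ';', split on ';', strip each segment; objective: simpler.

-- ===== PORT A =====
-- one step of A's for-loop over the characters; state = (rvl, cache, first_pound)
def pvAStep (st : List (List Char) × List Char × Bool) (ch : Char) :
    List (List Char) × List Char × Bool :=
  let (rvl, cache, fp) := st
  if ch = ';' then (rvl ++ [PySem.Chars.strip cache], [], fp)
  else if ch = '#' ∧ fp then (rvl ++ [PySem.Chars.strip cache], [], false)
  else (rvl, cache ++ [ch], fp)

def emoji_sequence_line2rvl (line : String) : List String :=
  match line.toList.foldl pvAStep ([], [], true) with
  | (rvl, cache, _) => (rvl ++ [PySem.Chars.strip cache]).map String.ofList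

-- ===== PORT B =====
-- hand port of line.replace('#', ';', 1): replace only the FIRST '#' (exact: str.replace with count 1)
def pvReplaceFirstHash : List Char → List Char
  | [] => []
  | c :: cs => if c = '#' then ';' :: cs else c :: pvReplaceFirstHash cs

def emoji_sequence_line2rvl_alt (line : String) : List String :=
  ((PySem.Chars.splitOn (pvReplaceFirstHash line.toList) [';']).map
      PySem.Chars.strip).map String.ofList

-- ===== PRECONDITION & SPEC =====
def Spec_emoji_sequence_line2rvl (line : String) (out : List String) : Prop := out = emoji_sequence_line2rvl_alt line
instance (line : String) (out : List String) : Decidable (Spec_emoji_sequence_line2rvl line out) := by unfold Spec_emoji_sequence_line2rvl; infer_instance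

-- ===== CLAIM (what is proved, stated in full; the proofs are below) =====
def Claim_equal_emoji_sequence_line2rvl : Prop := ∀ (line : String), Dom_emoji_sequence_line2rvl line → Spec_emoji_sequence_line2rvl line (emoji_sequence_line2rvl line)

-- ===== LEMMAS AND PROOFS =====

theorem pvModifyHead_id (l : List (List Char)) : l.modifyHead (fun x => x) = l := by
  cases l <;> simp

-- structural characterisation of split-on-a-single-character (proof device only)
def pvSplit (c0 : Char) : List Char → List (List Char)
  | [] => [[]]
  | c :: cs =>
    if c = c0 then [] :: pvSplit c0 cs
    else
      match pvSplit c0 cs with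
      | [] => [[c]]
      | h :: t => (c :: h) :: t

theorem pvSplit_ne_nil (c0 : Char) (l : List Char) : pvSplit c0 l ≠ [] := by
  cases l with
  | nil => simp [pvSplit]
  | cons c cs =>
    simp only [pvSplit]
    split
    · simp
    · cases pvSplit c0 cs <;> simp

theorem pvSplitOn_go_eq (c0 : Char) (fuel : Nat) (l cur : List Char)
    (acc : List (List Char)) (hf : l.length < fuel) :
    PySem.Chars.splitOn.go [c0] fuel l cur acc
      = acc.reverse ++ (pvSplit c0 l).modifyHead (cur.reverse ++ ·) := by
  induction fuel generalizing l cur acc with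
  | zero => omega
  | succ f ih =>
    cases l with
    | nil => simp [PySem.Chars.splitOn.go, pvSplit]
    | cons c rest =>
      by_cases hc : c = c0
      · subst hc
        have hpre : List.isPrefixOf [c] (c :: rest) = true := by
          simp [List.isPrefixOf]
        rw [PySem.Chars.splitOn.go]
        simp only [hpre, if_true, List.length_cons, List.drop_succ_cons,
          List.length_nil, List.drop_zero]
        rw [ih rest [] (cur.reverse :: acc) (by simpa using Nat.lt_of_succ_lt_succ hf)]
        simp only [pvSplit, List.reverse_cons, List.reverse_nil,
          List.nil_append]
        simp [pvModifyHead_id]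
      · have hpre : List.isPrefixOf [c0] (c :: rest) = false := by
          simp [List.isPrefixOf, BEq.beq]
          intro h; exact hc h.symm
        rw [PySem.Chars.splitOn.go]
        simp only [hpre]
        rw [if_neg (by simp)]
        rw [ih rest (c :: cur) acc (by simpa using Nat.lt_of_succ_lt_succ hf)]
        simp only [pvSplit, if_neg hc]
        rcases h : pvSplit c0 rest with _ | ⟨hd, tl⟩
        · exact absurd h (pvSplit_ne_nil c0 rest)
        · simp

theorem pvSplitOn_single (c0 : Char) (l : List Char) :
    PySem.Chars.splitOn l [c0] = pvSplit c0 l := by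
  rw [PySem.Chars.splitOn, pvSplitOn_go_eq c0 (l.length + 1) l [] []
    (Nat.lt_succ_self _)]
  simp [pvModifyHead_id]

-- A's loop after the first pound (flag = false): split the remaining chars on ';'
theorem pvFoldl_false (cs : List Char) : ∀ (rvl : List (List Char)) (cache : List Char),
    (cs.foldl pvAStep (rvl, cache, false)).1
        ++ [PySem.Chars.strip (cs.foldl pvAStep (rvl, cache, false)).2.1]
      = rvl ++ ((pvSplit ';' cs).modifyHead (cache ++ ·)).map PySem.Chars.strip := by
  induction cs with
  | nil => intro rvl cache; simp [pvSplit]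
  | cons c cs ih =>
    intro rvl cache
    rw [List.foldl_cons]
    by_cases hc : c = ';'
    · subst hc
      rw [show pvAStep (rvl, cache, false) ';'
            = (rvl ++ [PySem.Chars.strip cache], [], false) from by simp [pvAStep]]
      rw [ih]
      cases h : pvSplit ';' cs with
      | nil => exact absurd h (pvSplit_ne_nil ';' cs)
      | cons hd tl => simp [pvSplit, h]
    · rw [show pvAStep (rvl, cache, false) c
            = (rvl, cache ++ [c], false) from by simp [pvAStep, hc]]
      rw [ih]
      simp only [pvSplit, if_neg hc]
      rcases h : pvSplit ';' cs with _ | ⟨hd, tl⟩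
      · exact absurd h (pvSplit_ne_nil ';' cs)
      · simp

-- A's loop before any pound (flag = true): split (first '#' turned into ';') on ';'
theorem pvFoldl_true (cs : List Char) : ∀ (rvl : List (List Char)) (cache : List Char),
    (cs.foldl pvAStep (rvl, cache, true)).1
        ++ [PySem.Chars.strip (cs.foldl pvAStep (rvl, cache, true)).2.1]
      = rvl ++ ((pvSplit ';' (pvReplaceFirstHash cs)).modifyHead
          (cache ++ ·)).map PySem.Chars.strip := by
  induction cs with
  | nil => intro rvl cache; simp [pvSplit, pvReplaceFirstHash]
  | cons c cs ih =>
    intro rvl cache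
    rw [List.foldl_cons]
    by_cases hp : c = '#'
    · subst hp
      rw [show pvAStep (rvl, cache, true) '#'
            = (rvl ++ [PySem.Chars.strip cache], [], false) from by simp [pvAStep]]
      rw [pvFoldl_false]
      simp only [pvReplaceFirstHash]
      simp [pvSplit, pvModifyHead_id]
    · by_cases hc : c = ';'
      · subst hc
        rw [show pvAStep (rvl, cache, true) ';'
              = (rvl ++ [PySem.Chars.strip cache], [], true) from by simp [pvAStep]]
        rw [ih]
        simp only [pvReplaceFirstHash]
        rw [if_neg (by decide)]
        cases h : pvSplit ';' (pvReplaceFirstHash cs) with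
        | nil => exact absurd h (pvSplit_ne_nil ';' _)
        | cons hd tl => simp [pvSplit, h]
      · rw [show pvAStep (rvl, cache, true) c
              = (rvl, cache ++ [c], true) from by simp [pvAStep, hc, hp]]
        rw [ih]
        simp only [pvReplaceFirstHash, if_neg hp, pvSplit, if_neg hc]
        rcases h : pvSplit ';' (pvReplaceFirstHash cs) with _ | ⟨hd, tl⟩
        · exact absurd h (pvSplit_ne_nil ';' _)
        · simp

-- ===== VERDICT (by name: the statement is the Claim_ definition above) =====
theorem emoji_sequence_line2rvl_spec : Claim_equal_emoji_sequence_line2rvl := by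
  intro line _
  unfold Spec_emoji_sequence_line2rvl emoji_sequence_line2rvl emoji_sequence_line2rvl_alt
  rw [pvSplitOn_single]
  have h := pvFoldl_true line.toList [] []
  rcases hst : line.toList.foldl pvAStep ([], [], true) with ⟨rvl, cache, fp⟩
  rw [hst] at h
  simp only [List.nil_append, pvModifyHead_id] at h
  simp only [h]
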